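-- pv_equiv track=rewrite | github.com/LucasPln/MarcoPython | PROJET_PIFE_10/FMP/FMP.py | notePossibilite
-- ===== SOURCE A (Python) =====
-- def notePossibilite(possibilite, listeEleve, notesAttribuees):
--     medianeGroupe = []
--     for groupe in possibilite:
--         notesGroupe = []
--         for eleve1 in groupe:
--             for eleve2 in groupe:
--                 note = notesAttribuees[listeEleve.index(eleve1)][listeEleve.index(eleve2)]
--                 if(not note == "-"):
--                     notesGroupe.append(note)
--
--         if("AR" in notesGroupe):
--             medianeGroupe.append("AR")
--         elif("I" in notesGroupe):
--             medianeGroupe.append("I")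
--         elif("P" in notesGroupe):
--             medianeGroupe.append("P")
--         elif("AB" in notesGroupe):
--             medianeGroupe.append("AB")
--         elif("B" in notesGroupe):
--             medianeGroupe.append("B")
--         elif("TB" in notesGroupe):
--             medianeGroupe.append("TB")
--
--     if("AR" in medianeGroupe):
--         return "AR"
--     elif("I" in medianeGroupe):
--         return "I"
--     elif("P" in medianeGroupe):
--         return "P"
--     elif("AB" in medianeGroupe):
--         return "AB"
--     elif("B" in medianeGroupe):
--         return "B"
--     elif("TB" in medianeGroupe):
--         return "TB"
-- ===== SOURCE B (Python) =====
-- def notePossibilite(possibilite, listeEleve, notesAttribuees):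
--     # single pass: collect every non-'-' note across all groups into one set,
--     # then return the first label of the fixed precedence present in it
--     notes = set()
--     for groupe in possibilite:
--         for eleve1 in groupe:
--             for eleve2 in groupe:
--                 note = notesAttribuees[listeEleve.index(eleve1)][listeEleve.index(eleve2)]
--                 if note != "-":
--                     notes.add(note)
--     for label in ("AR", "I", "P", "AB", "B", "TB"):
--         if label in notes:
--             return label
--     return None
-- ===== Notes on version B (the rewrite author's own statement) =====
-- stated objective: simpler
-- what changed: The two nested priority cascades (per-group label, then aggregate label) collapse into one: B pools every non-'-' note from all groups into a single set and returns the first label of the fixed precedence AR>I>P>AB>B>TB found in it, eliminating the per-group notesGroupe/medianeGroupe reduction stage; correct because a first-match over minima of groups equals a first-match over the union.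
import Mathlib
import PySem

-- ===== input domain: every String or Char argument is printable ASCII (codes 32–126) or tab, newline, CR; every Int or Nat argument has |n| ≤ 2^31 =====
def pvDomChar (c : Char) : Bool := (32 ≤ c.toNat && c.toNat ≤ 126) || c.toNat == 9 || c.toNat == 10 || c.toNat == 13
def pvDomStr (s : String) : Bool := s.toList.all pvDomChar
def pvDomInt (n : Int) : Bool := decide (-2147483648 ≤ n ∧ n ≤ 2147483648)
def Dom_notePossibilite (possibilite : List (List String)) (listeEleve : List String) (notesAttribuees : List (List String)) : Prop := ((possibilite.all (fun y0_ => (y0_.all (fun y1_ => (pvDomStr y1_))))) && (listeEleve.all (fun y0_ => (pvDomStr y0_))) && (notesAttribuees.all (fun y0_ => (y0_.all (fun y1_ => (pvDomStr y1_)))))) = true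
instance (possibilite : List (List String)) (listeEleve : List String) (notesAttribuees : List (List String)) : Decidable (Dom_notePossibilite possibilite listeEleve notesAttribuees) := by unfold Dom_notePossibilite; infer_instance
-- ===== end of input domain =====

-- B collapses A's two nested priority cascades (per-group label, then aggregate label) into one pass:
-- it pools every non-'-' note into a single set and returns the first precedence label present (objective: simpler).

-- ===== PORT A =====
-- shared access helper: notesAttribuees[listeEleve.index(e1)][listeEleve.index(e2)]
-- (none = the access raises ValueError/IndexError in Python; such inputs are outside Pre_)
def pvNoteAcc (listeEleve : List String) (notesAttribuees : List (List String)) (e1 e2 : String) : Option String :=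
  match PySem.List.index? listeEleve e1, PySem.List.index? listeEleve e2 with
  | some i, some j => (notesAttribuees[i]?).bind (fun row => row[j]?)
  | _, _ => none

def notePossibilite (possibilite : List (List String)) (listeEleve : List String) (notesAttribuees : List (List String)) : Option String :=
  let medianeGroupe := possibilite.foldl (fun medianeGroupe groupe =>
    let notesGroupe := groupe.foldl (fun notesGroupe eleve1 =>
      groupe.foldl (fun notesGroupe eleve2 =>
        let note := (pvNoteAcc listeEleve notesAttribuees eleve1 eleve2).getD "-"
        if !(note == "-") then notesGroupe ++ [note] else notesGroupe) notesGroupe) ([] : List String)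
    if notesGroupe.contains "AR" then medianeGroupe ++ ["AR"]
    else if notesGroupe.contains "I" then medianeGroupe ++ ["I"]
    else if notesGroupe.contains "P" then medianeGroupe ++ ["P"]
    else if notesGroupe.contains "AB" then medianeGroupe ++ ["AB"]
    else if notesGroupe.contains "B" then medianeGroupe ++ ["B"]
    else if notesGroupe.contains "TB" then medianeGroupe ++ ["TB"]
    else medianeGroupe) ([] : List String)
  if medianeGroupe.contains "AR" then some "AR"
  else if medianeGroupe.contains "I" then some "I"
  else if medianeGroupe.contains "P" then some "P"
  else if medianeGroupe.contains "AB" then some "AB"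
  else if medianeGroupe.contains "B" then some "B"
  else if medianeGroupe.contains "TB" then some "TB"
  else none

-- ===== PORT B =====
def pvPriority : List String := ["AR", "I", "P", "AB", "B", "TB"]

def notePossibilite_alt (possibilite : List (List String)) (listeEleve : List String) (notesAttribuees : List (List String)) : Option String :=
  let notes : PySem.Set String := possibilite.foldl (fun notes groupe =>
    groupe.foldl (fun notes eleve1 =>
      groupe.foldl (fun notes eleve2 =>
        let note := (pvNoteAcc listeEleve notesAttribuees eleve1 eleve2).getD "-"
        if note != "-" then PySem.Set.add notes note else notes) notes) notes) PySem.Set.empty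
  pvPriority.find? (fun label => PySem.Set.contains notes label)

-- ===== PRECONDITION & SPEC =====
-- Pre_ excludes exactly the inputs on which the Python access raises: some eleve of a group is
-- absent from listeEleve (ValueError) or an index falls outside notesAttribuees / its row (IndexError).
def Pre_notePossibilite (possibilite : List (List String)) (listeEleve : List String) (notesAttribuees : List (List String)) : Prop :=
  (possibilite.all (fun groupe => groupe.all (fun e1 =>
    match PySem.List.index? listeEleve e1 with
    | none => false
    | some i =>
      match notesAttribuees[i]? with
      | none => false
      | some row => groupe.all (fun e2 =>
          match PySem.List.index? listeEleve e2 with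
          | none => false
          | some j => decide (j < row.length))))) = true
instance (possibilite : List (List String)) (listeEleve : List String) (notesAttribuees : List (List String)) : Decidable (Pre_notePossibilite possibilite listeEleve notesAttribuees) := by unfold Pre_notePossibilite; infer_instance

def pvWitness_notePossibilite : List (List String) × List String × List (List String) :=
  ([["a", "b"], ["c"]], ["a", "b", "c"], [["-", "P", "-"], ["B", "-", "-"], ["-", "-", "TB"]])

def Spec_notePossibilite (possibilite : List (List String)) (listeEleve : List String) (notesAttribuees : List (List String)) (out : Option String) : Prop := out = notePossibilite_alt possibilite listeEleve notesAttribuees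
instance (possibilite : List (List String)) (listeEleve : List String) (notesAttribuees : List (List String)) (out : Option String) : Decidable (Spec_notePossibilite possibilite listeEleve notesAttribuees out) := by unfold Spec_notePossibilite; infer_instance

-- ===== CLAIM (what is proved, stated in full; the proofs are below) =====
def Claim_equal_notePossibilite : Prop := ∀ (possibilite : List (List String)) (listeEleve : List String) (notesAttribuees : List (List String)), Dom_notePossibilite possibilite listeEleve notesAttribuees → Pre_notePossibilite possibilite listeEleve notesAttribuees → Spec_notePossibilite possibilite listeEleve notesAttribuees (notePossibilite possibilite listeEleve notesAttribuees)

-- ===== LEMMAS AND PROOFS =====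

-- the note of a pair, as both ports compute it ('-' only as the skipped value)
def pvF (listeEleve : List String) (notesAttribuees : List (List String)) (e1 e2 : String) : String :=
  (pvNoteAcc listeEleve notesAttribuees e1 e2).getD "-"

-- A's notesGroupe of one group, in closed form
def pvNotesG (listeEleve : List String) (notesAttribuees : List (List String)) (g : List String) : List String :=
  g.flatMap (fun e1 => (g.filter (fun e2 => !(pvF listeEleve notesAttribuees e1 e2 == "-"))).map (pvF listeEleve notesAttribuees e1))

lemma pvInner (le : List String) (na : List (List String)) (e1 : String) :
    ∀ (g2 ng : List String),
    g2.foldl (fun notesGroupe eleve2 =>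
        let note := (pvNoteAcc le na e1 eleve2).getD "-"
        if !(note == "-") then notesGroupe ++ [note] else notesGroupe) ng
    = ng ++ (g2.filter (fun e2 => !(pvF le na e1 e2 == "-"))).map (pvF le na e1)
  | [], ng => by simp
  | e2 :: t, ng => by
      rw [List.foldl_cons, pvInner le na e1 t]
      simp only [List.filter_cons, pvF]
      by_cases h : ((pvNoteAcc le na e1 e2).getD "-") == "-" <;> simp [h, pvF]

lemma pvOuter (le : List String) (na : List (List String)) (g : List String) :
    ∀ (g1 ng : List String),
    g1.foldl (fun notesGroupe eleve1 =>
      g.foldl (fun notesGroupe eleve2 =>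
        let note := (pvNoteAcc le na eleve1 eleve2).getD "-"
        if !(note == "-") then notesGroupe ++ [note] else notesGroupe) notesGroupe) ng
    = ng ++ g1.flatMap (fun e1 => (g.filter (fun e2 => !(pvF le na e1 e2 == "-"))).map (pvF le na e1))
  | [], ng => by simp
  | e1 :: t, ng => by
      rw [List.foldl_cons, pvInner le na e1 g, pvOuter le na g t]
      simp

lemma pvStep (ns med : List String) :
    (if ns.contains "AR" then med ++ ["AR"]
     else if ns.contains "I" then med ++ ["I"]
     else if ns.contains "P" then med ++ ["P"]
     else if ns.contains "AB" then med ++ ["AB"]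
     else if ns.contains "B" then med ++ ["B"]
     else if ns.contains "TB" then med ++ ["TB"]
     else med)
    = med ++ (pvPriority.find? (fun x => ns.contains x)).toList := by
  simp only [pvPriority, List.find?]
  split_ifs <;> simp_all

lemma pvMedianeAux (le : List String) (na : List (List String)) :
    ∀ (p : List (List String)) (med : List String),
    p.foldl (fun medianeGroupe groupe =>
      let notesGroupe := groupe.foldl (fun notesGroupe eleve1 =>
        groupe.foldl (fun notesGroupe eleve2 =>
          let note := (pvNoteAcc le na eleve1 eleve2).getD "-"
          if !(note == "-") then notesGroupe ++ [note] else notesGroupe) notesGroupe) ([] : List String)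
      if notesGroupe.contains "AR" then medianeGroupe ++ ["AR"]
      else if notesGroupe.contains "I" then medianeGroupe ++ ["I"]
      else if notesGroupe.contains "P" then medianeGroupe ++ ["P"]
      else if notesGroupe.contains "AB" then medianeGroupe ++ ["AB"]
      else if notesGroupe.contains "B" then medianeGroupe ++ ["B"]
      else if notesGroupe.contains "TB" then medianeGroupe ++ ["TB"]
      else medianeGroupe) med
    = med ++ p.flatMap (fun g => (pvPriority.find? (fun x => (pvNotesG le na g).contains x)).toList)
  | [], med => by simp
  | g :: t, med => by
      rw [List.foldl_cons]
      show List.foldl _ (if _ then _ else _) t = _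
      rw [pvOuter le na g g, pvStep, pvMedianeAux le na t]
      simp [pvNotesG]

lemma pvMemS2 (le : List String) (na : List (List String)) (e1 : String) (x : String) :
    ∀ (g2 : List String) (s : PySem.Set String),
    x ∈ g2.foldl (fun notes eleve2 =>
        let note := (pvNoteAcc le na e1 eleve2).getD "-"
        if note != "-" then PySem.Set.add notes note else notes) s
    ↔ x ∈ s ∨ x ∈ (g2.filter (fun e2 => !(pvF le na e1 e2 == "-"))).map (pvF le na e1)
  | [], s => by simp
  | e2 :: t, s => by
      rw [List.foldl_cons]
      show x ∈ List.foldl _ (if _ then _ else _) t ↔ _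
      rw [pvMemS2 le na e1 x t]
      by_cases h : ((pvNoteAcc le na e1 e2).getD "-") = "-" <;>
        simp [h, pvF, PySem.Set.mem_add] <;> tauto

lemma pvMemS1 (le : List String) (na : List (List String)) (g : List String) (x : String) :
    ∀ (g1 : List String) (s : PySem.Set String),
    x ∈ g1.foldl (fun notes eleve1 =>
      g.foldl (fun notes eleve2 =>
        let note := (pvNoteAcc le na eleve1 eleve2).getD "-"
        if note != "-" then PySem.Set.add notes note else notes) notes) s
    ↔ x ∈ s ∨ ∃ e1 ∈ g1, x ∈ (g.filter (fun e2 => !(pvF le na e1 e2 == "-"))).map (pvF le na e1)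
  | [], s => by simp
  | e1 :: t, s => by
      rw [List.foldl_cons, pvMemS1 le na g x t, pvMemS2 le na e1 x g]
      simp
      rw [or_assoc]

lemma pvMemS0 (le : List String) (na : List (List String)) (x : String) :
    ∀ (p : List (List String)) (s : PySem.Set String),
    x ∈ p.foldl (fun notes groupe =>
      groupe.foldl (fun notes eleve1 =>
        groupe.foldl (fun notes eleve2 =>
          let note := (pvNoteAcc le na eleve1 eleve2).getD "-"
          if note != "-" then PySem.Set.add notes note else notes) notes) notes) s
    ↔ x ∈ s ∨ ∃ g ∈ p, x ∈ pvNotesG le na g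
  | [], s => by simp
  | g :: t, s => by
      rw [List.foldl_cons, pvMemS0 le na x t, pvMemS1 le na g x g]
      simp [pvNotesG]
      rw [or_assoc]

-- first label of Q present in the pooled union = first label of Q present in the per-group first-match list,
-- by induction peeling the priority list, carrying the already-excluded prefix R
lemma pvKey (N : List String → List String) (gs : List (List String)) (S : List String)
    (hS : ∀ x, x ∈ S ↔ ∃ g ∈ gs, x ∈ N g) :
    ∀ (Q R : List String), (∀ l ∈ R, ∀ g ∈ gs, l ∉ N g) →
    Q.find? (fun l => (gs.flatMap (fun g => ((R ++ Q).find? (fun x => (N g).contains x)).toList)).contains l)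
    = Q.find? (fun l => S.contains l)
  | [], R, hR => by simp
  | h :: t, R, hR => by
    have hcond : (gs.flatMap (fun g => ((R ++ h :: t).find? (fun x => (N g).contains x)).toList)).contains h
        = S.contains h := by
      rw [Bool.eq_iff_iff]
      simp only [List.contains_iff_mem, List.mem_flatMap, Option.mem_toList, hS]
      constructor
      · rintro ⟨g, hg, hfind⟩
        have := List.find?_some hfind
        simp only [List.contains_iff_mem] at this
        exact ⟨g, hg, this⟩
      · rintro ⟨g, hg, hmem⟩
        refine ⟨g, hg, ?_⟩
        rw [List.find?_append]
        have hnone : R.find? (fun x => (N g).contains x) = none := by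
          rw [List.find?_eq_none]
          intro l hl
          simp only [List.contains_iff_mem]
          simpa using hR l hl g hg
        rw [hnone]
        simp [hmem]
    cases hb : S.contains h with
    | true =>
        rw [List.find?_cons, List.find?_cons, hcond, hb]
    | false =>
        rw [List.find?_cons, List.find?_cons, hcond, hb]
        have hR' : ∀ l ∈ R ++ [h], ∀ g ∈ gs, l ∉ N g := by
          intro l hl g hg
          rcases List.mem_append.mp hl with hl | hl
          · exact hR l hl g hg
          · have : l = h := by simpa using hl
            subst this
            intro hmem
            have hc : S.contains l = true := List.contains_iff_mem.mpr ((hS l).mpr ⟨g, hg, hmem⟩)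
            rw [hb] at hc
            exact Bool.false_ne_true hc
        have hEq : R ++ h :: t = (R ++ [h]) ++ t := by simp
        rw [hEq]
        exact pvKey N gs S hS t (R ++ [h]) hR'

lemma pvStep2 (ms : List String) :
    (if ms.contains "AR" then some "AR"
     else if ms.contains "I" then some "I"
     else if ms.contains "P" then some "P"
     else if ms.contains "AB" then some "AB"
     else if ms.contains "B" then some "B"
     else if ms.contains "TB" then some "TB"
     else none)
    = pvPriority.find? (fun l => ms.contains l) := by
  simp only [pvPriority, List.find?]
  split_ifs <;> simp_all

theorem pvMain (p : List (List String)) (le : List String) (na : List (List String)) :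
    notePossibilite p le na = notePossibilite_alt p le na := by
  unfold notePossibilite notePossibilite_alt
  rw [pvMedianeAux le na p, pvStep2]
  have hS : ∀ x, x ∈ (p.foldl (fun notes groupe =>
      groupe.foldl (fun notes eleve1 =>
        groupe.foldl (fun notes eleve2 =>
          let note := (pvNoteAcc le na eleve1 eleve2).getD "-"
          if note != "-" then PySem.Set.add notes note else notes) notes) notes) PySem.Set.empty)
      ↔ ∃ g ∈ p, x ∈ pvNotesG le na g := by
    intro x
    rw [pvMemS0 le na x p PySem.Set.empty]
    simp [PySem.Set.empty]
  have hkey := pvKey (pvNotesG le na) p _ hS pvPriority [] (by simp)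
  simp only [List.nil_append] at hkey ⊢
  rw [hkey]
  simp [PySem.Set.contains_eq_listContains]

-- ===== VERDICT (by name: the statement is the Claim_ definition above) =====
theorem notePossibilite_spec : Claim_equal_notePossibilite := by
  intro p le na _ _
  unfold Spec_notePossibilite
  exact pvMain p le na
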